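-- pv_equiv track=rewrite | github.com/StratosKakalis/Thesis | Dataset_Creation/uri_injected_dataset.py | shorten_uris
-- ===== SOURCE A (Python) =====
-- def shorten_uris(uri):
--     # This prefix map will be used to shrink the uri's down to the prefix level, to help the model better understand them and decrease mistakes.
--     prefix_map = {"http://www.opengis.net/ont/geosparql#" : "geo:",
--                "http://www.opengis.net/def/function/geosparql/" : "geof:",
--                "http://www.w3.org/1999/02/22-rdf-syntax-ns#" : "rdf:",
--                "http://www.w3.org/2000/01/rdf-schema#" : "rdfs:",
--                "http://www.w3.org/2001/XMLSchema#" : "xsd:",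
--                "http://yago-knowledge.org/resource/" : "yago:",
--                "http://kr.di.uoa.gr/yago2geo/resource/" : "y2geor:",
--                "http://kr.di.uoa.gr/yago2geo/ontology/" : "y2geoo:",
--                "http://strdf.di.uoa.gr/ontology#" : "strdf:",
--                "http://www.opengis.net/def/uom/OGC/1.0/" : "uom:",
--                "http://www.w3.org/2002/07/owl#" : "owl:"}
--
--     for uri_map, prefix in prefix_map.items():
--         uri = uri.replace(uri_map, prefix)
--     return uri
-- ===== SOURCE B (Python) =====
-- # Two-level scan: every known prefix starts with "http://", so walk the string once,
-- # and only where "http://" appears try to match one of the prefix *tails* and emit its short form.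
-- _SCHEME = "http://"
--
-- _TAILS = {"www.opengis.net/ont/geosparql#": "geo:",
--           "www.opengis.net/def/function/geosparql/": "geof:",
--           "www.w3.org/1999/02/22-rdf-syntax-ns#": "rdf:",
--           "www.w3.org/2000/01/rdf-schema#": "rdfs:",
--           "www.w3.org/2001/XMLSchema#": "xsd:",
--           "yago-knowledge.org/resource/": "yago:",
--           "kr.di.uoa.gr/yago2geo/resource/": "y2geor:",
--           "kr.di.uoa.gr/yago2geo/ontology/": "y2geoo:",
--           "strdf.di.uoa.gr/ontology#": "strdf:",
--           "www.opengis.net/def/uom/OGC/1.0/": "uom:",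
--           "www.w3.org/2002/07/owl#": "owl:"}
--
-- def shorten_uris(uri):
--     out = []
--     i, n = 0, len(uri)
--     while i < n:
--         if uri.startswith(_SCHEME, i):
--             rest = uri[i + 7:]
--             for tail, short in _TAILS.items():
--                 if rest.startswith(tail):
--                     out.append(short)
--                     i += 7 + len(tail)
--                     break
--             else:
--                 out.append(uri[i])
--                 i += 1
--         else:
--             out.append(uri[i])
--             i += 1
--     return "".join(out)
-- ===== Notes on version B (the rewrite author's own statement) =====
-- stated objective: alternative
-- what changed: Replaces the 11 sequential full-string str.replace passes with a single left-to-right scan that first tests for the URL scheme shared by all prefixes and only then matches one of the 11 prefix tails from a table, emitting its short form.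
import Mathlib
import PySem

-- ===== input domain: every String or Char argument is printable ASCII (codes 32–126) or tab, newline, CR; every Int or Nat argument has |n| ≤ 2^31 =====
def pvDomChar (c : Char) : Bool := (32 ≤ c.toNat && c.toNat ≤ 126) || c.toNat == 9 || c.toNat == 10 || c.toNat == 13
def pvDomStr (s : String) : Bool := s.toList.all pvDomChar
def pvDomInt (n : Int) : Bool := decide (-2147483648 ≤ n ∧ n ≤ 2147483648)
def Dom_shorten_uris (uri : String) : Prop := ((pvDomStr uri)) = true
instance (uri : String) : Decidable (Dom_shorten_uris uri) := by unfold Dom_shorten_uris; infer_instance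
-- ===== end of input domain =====

-- B replaces A's 11 sequential full-string str.replace passes by a single two-level
-- left-to-right scan: at each position it first tests for the URL scheme shared by all prefixes,
-- and only then matches one of the prefix tails; same return value (objective:
-- alternative, no speed claim).

-- ===== PORT A =====
-- the prefix_map dict literal (distinct keys, insertion order) as an association list
def pvPrefixMap : List (String × String) :=
  [("http://www.opengis.net/ont/geosparql#", "geo:"),
   ("http://www.opengis.net/def/function/geosparql/", "geof:"),
   ("http://www.w3.org/1999/02/22-rdf-syntax-ns#", "rdf:"),
   ("http://www.w3.org/2000/01/rdf-schema#", "rdfs:"),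
   ("http://www.w3.org/2001/XMLSchema#", "xsd:"),
   ("http://yago-knowledge.org/resource/", "yago:"),
   ("http://kr.di.uoa.gr/yago2geo/resource/", "y2geor:"),
   ("http://kr.di.uoa.gr/yago2geo/ontology/", "y2geoo:"),
   ("http://strdf.di.uoa.gr/ontology#", "strdf:"),
   ("http://www.opengis.net/def/uom/OGC/1.0/", "uom:"),
   ("http://www.w3.org/2002/07/owl#", "owl:")]

-- for uri_map, prefix in prefix_map.items(): uri = uri.replace(uri_map, prefix)
def shorten_uris (uri : String) : String :=
  pvPrefixMap.foldl (fun u pr => PySem.Str.replace u pr.1 pr.2) uri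

-- ===== PORT B =====
-- _SCHEME = "http://"
def pvScheme : List Char := "http://".toList

-- _TAILS: prefix tail (after the scheme) -> short form, as char lists
def pvTails : List (List Char × List Char) :=
  [("www.opengis.net/ont/geosparql#".toList, "geo:".toList),
   ("www.opengis.net/def/function/geosparql/".toList, "geof:".toList),
   ("www.w3.org/1999/02/22-rdf-syntax-ns#".toList, "rdf:".toList),
   ("www.w3.org/2000/01/rdf-schema#".toList, "rdfs:".toList),
   ("www.w3.org/2001/XMLSchema#".toList, "xsd:".toList),
   ("yago-knowledge.org/resource/".toList, "yago:".toList),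
   ("kr.di.uoa.gr/yago2geo/resource/".toList, "y2geor:".toList),
   ("kr.di.uoa.gr/yago2geo/ontology/".toList, "y2geoo:".toList),
   ("strdf.di.uoa.gr/ontology#".toList, "strdf:".toList),
   ("www.opengis.net/def/uom/OGC/1.0/".toList, "uom:".toList),
   ("www.w3.org/2002/07/owl#".toList, "owl:".toList)]

-- the while loop of Source B as structural recursion over the characters:
-- `uri.startswith(_SCHEME, i)` → pvScheme.isPrefixOf; `rest = uri[i+7:]` is
-- List.drop 6 t (7 chars of c :: t); a matched tail advances i by 7 + len(tail),
-- i.e. drops 6 + length more of t; otherwise one character is copied.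
def pvScanB : List Char → List Char
  | [] => []
  | c :: t =>
    if pvScheme.isPrefixOf (c :: t) then
      match pvTails.find? (fun r => r.1.isPrefixOf (t.drop 6)) with
      | some r => r.2 ++ pvScanB (t.drop (6 + r.1.length))
      | none => c :: pvScanB t
    else c :: pvScanB t
termination_by s => s.length
decreasing_by all_goals (simp; try omega)

def shorten_uris_alt (uri : String) : String :=
  String.ofList (pvScanB uri.toList)

-- ===== PRECONDITION & SPEC =====
def Spec_shorten_uris (uri : String) (out : String) : Prop := out = shorten_uris_alt uri
instance (uri : String) (out : String) : Decidable (Spec_shorten_uris uri out) := by unfold Spec_shorten_uris; infer_instance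

-- ===== CLAIM (what is proved, stated in full; the proofs are below) =====
def Claim_equal_shorten_uris : Prop := ∀ (uri : String), Dom_shorten_uris uri → Spec_shorten_uris uri (shorten_uris uri)

-- ===== LEMMAS AND PROOFS =====

-- A's str.replace (nonempty pattern), as a plain structural recursion on the subject.
def pvRep (old rep : List Char) : List Char → List Char
  | [] => []
  | c :: t =>
    if old.isPrefixOf (c :: t) then rep ++ pvRep old rep (List.drop (old.length - 1) t)
    else c :: pvRep old rep t
termination_by s => s.length
decreasing_by all_goals (simp; try omega)

-- one left-to-right scan with a full-prefix table (the reference form both ports reduce to)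
def pvScan (tbl : List (List Char × List Char)) : List Char → List Char
  | [] => []
  | c :: t =>
    match tbl.find? (fun rule => rule.1.isPrefixOf (c :: t)) with
    | some rule => rule.2 ++ pvScan tbl (List.drop (rule.1.length - 1) t)
    | none => c :: pvScan tbl t
termination_by s => s.length
decreasing_by all_goals (simp; try omega)

-- the full-prefix table: scheme ++ tail, from B's tables
def pvRules : List (List Char × List Char) :=
  pvTails.map (fun r => (pvScheme ++ r.1, r.2))

theorem pvGo_spec (old rep : List Char) (hold : old ≠ []) :
    ∀ fuel s acc, s.length ≤ fuel →
      PySem.Chars.replace.go old rep fuel s acc = acc.reverse ++ pvRep old rep s := by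
  intro fuel
  induction fuel with
  | zero =>
    intro s acc h
    have : s = [] := by cases s <;> simp_all
    subst this
    simp [PySem.Chars.replace.go, pvRep]
  | succ n ih =>
    intro s acc h
    cases s with
    | nil => simp [PySem.Chars.replace.go, pvRep]
    | cons c t =>
      rw [PySem.Chars.replace.go]
      by_cases hp : old.isPrefixOf (c :: t) = true
      · rw [if_pos hp, pvRep, if_pos hp]
        have hdrop : List.drop old.length (c :: t) = List.drop (old.length - 1) t := by
          cases old with
          | nil => simp_all
          | cons o p => simp
        rw [hdrop]
        rw [ih _ _ (by simp at h ⊢; omega)]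
        simp
      · rw [if_neg hp, pvRep, if_neg hp]
        rw [ih _ _ (by simp at h; omega)]
        simp

theorem pvReplace_eq_pvRep (old rep s : List Char) (hold : old ≠ []) :
    PySem.Chars.replace s old rep = pvRep old rep s := by
  rw [PySem.Chars.replace]
  rw [if_neg (by cases old <;> simp_all)]
  rw [pvGo_spec old rep hold s.length s [] le_rfl]
  simp

-- "no nonempty suffix of w is prefix-comparable with P": P-replacement passes w through
def pvFree (P w : List Char) : Bool :=
  w.tails.all (fun u => u.isEmpty || (!(P.isPrefixOf u) && !(u.isPrefixOf P)))

theorem pvPrefix_of_append {p u v : List Char} (h : p <+: u ++ v) : p <+: u ∨ u <+: p := by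
  rcases le_or_gt p.length u.length with hle | hgt
  · left
    have h1 : p = (u ++ v).take p.length := List.prefix_iff_eq_take.mp h
    have h2 : (u ++ v).take p.length = u.take p.length := by
      rw [List.take_append]
      simp [Nat.sub_eq_zero_of_le hle]
    rw [h1, h2]
    exact List.take_prefix _ _
  · right
    have h1 : p = (u ++ v).take p.length := List.prefix_iff_eq_take.mp h
    have h2 : p.take u.length = u := by
      rw [h1, List.take_take, min_eq_left (le_of_lt hgt)]
      simp
    rw [← h2]
    exact List.take_prefix _ _

-- unpack pvFree at a cons
theorem pvFree_cons {P : List Char} {a : Char} {w : List Char}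
    (h : pvFree P (a :: w) = true) :
    ¬ P <+: (a :: w) ∧ ¬ (a :: w) <+: P ∧ pvFree P w = true := by
  simp only [pvFree, List.tails_cons, List.all_cons, Bool.and_eq_true] at h ⊢
  rcases h with ⟨h1, h2⟩
  simp only [List.isEmpty_cons, Bool.false_or, Bool.and_eq_true, Bool.not_eq_true'] at h1
  refine ⟨?_, ?_, h2⟩
  · intro hc; rcases h1 with ⟨hA, _⟩
    rw [List.isPrefixOf_iff_prefix.mpr hc] at hA; cases hA
  · intro hc; rcases h1 with ⟨_, hB⟩
    rw [List.isPrefixOf_iff_prefix.mpr hc] at hB; cases hB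

-- a pattern prefix-comparable with no nonempty suffix of w never matches inside w ++ x
theorem pvNoMatch_front {P : List Char} {a : Char} {w x : List Char}
    (h1 : ¬ P <+: (a :: w)) (h2 : ¬ (a :: w) <+: P) :
    P.isPrefixOf (a :: (w ++ x)) = false := by
  apply Bool.not_eq_true _ |>.mp
  intro hc
  have hpre : P <+: (a :: w) ++ x := by
    simpa using List.isPrefixOf_iff_prefix.mp hc
  rcases pvPrefix_of_append hpre with hA | hB
  · exact h1 hA
  · exact h2 hB

theorem pvRep_append (old rep w : List Char) (h : pvFree old w = true) :
    ∀ x, pvRep old rep (w ++ x) = w ++ pvRep old rep x := by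
  induction w with
  | nil => intro x; rfl
  | cons a w' ih =>
    intro x
    rcases pvFree_cons h with ⟨h1, h2, h3⟩
    rw [List.cons_append, pvRep, if_neg (by simp [pvNoMatch_front h1 h2])]
    rw [ih h3]
    simp

theorem pvScan_nil (s : List Char) : pvScan [] s = s := by
  induction s with
  | nil => rw [pvScan]
  | cons c t ih => rw [pvScan]; simp [ih]

theorem pvScan_append (tbl : List (List Char × List Char)) (w : List Char)
    (h : tbl.all (fun rule => pvFree rule.1 w) = true) :
    ∀ x, pvScan tbl (w ++ x) = w ++ pvScan tbl x := by
  induction w with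
  | nil => intro x; rfl
  | cons a w' ih =>
    intro x
    have hall := List.all_eq_true.mp h
    have hfind : (tbl.find? (fun rule => rule.1.isPrefixOf (a :: (w' ++ x)))) = none := by
      apply List.find?_eq_none.mpr
      intro rule hr
      rcases pvFree_cons (hall rule hr) with ⟨h1, h2, _⟩
      simp [pvNoMatch_front h1 h2]
    rw [List.cons_append, pvScan, hfind]
    have h' : tbl.all (fun rule => pvFree rule.1 w') = true := by
      apply List.all_eq_true.mpr
      intro rule hr
      exact (pvFree_cons (hall rule hr)).2.2
    rw [ih h']
    simp

-- no proper nonempty suffix of P is prefix-comparable with any replacement of tbl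
def pvSuffOK (tbl : List (List Char × List Char)) (P : List Char) : Bool :=
  P.tails.all (fun q => q.isEmpty || q == P ||
    tbl.all (fun rule => !(q.isPrefixOf rule.2) && !(rule.2.isPrefixOf q)))

-- scanning never creates a new occurrence of a proper suffix of P at the front
theorem pvScan_no_new (tbl : List (List Char × List Char)) (P : List Char)
    (hok : pvSuffOK tbl P = true) :
    ∀ t q, q ≠ [] → q <:+ P → q ≠ P → q.isPrefixOf (pvScan tbl t) = true →
      q.isPrefixOf t = true := by
  intro t
  generalize hlen : t.length = n
  induction n using Nat.strong_induction_on generalizing t with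
  | _ n IH => ?_
  subst hlen
  intro q hq0 hqs hqP hpre
  cases t with
  | nil =>
    rw [pvScan] at hpre
    cases q with
    | nil => exact absurd rfl hq0
    | cons a q' => simp [List.isPrefixOf] at hpre
  | cons c t' =>
    rw [pvScan] at hpre
    cases hf : tbl.find? (fun rule => rule.1.isPrefixOf (c :: t')) with
    | some rule =>
      rw [hf] at hpre
      exfalso
      have hmem := List.mem_of_find?_eq_some hf
      have hok' := List.all_eq_true.mp hok q ((List.mem_tails _ _).mpr hqs)
      cases hE : q.isEmpty with
      | true => exact hq0 (by simpa using hE)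
      | false =>
      cases hP : (q == P) with
      | true => exact hqP (by simpa using hP)
      | false =>
      have hall : tbl.all (fun rule => (!q.isPrefixOf rule.2 && !rule.2.isPrefixOf q)) = true := by
        rw [hE, hP] at hok'
        simpa using hok'
      · have h3 := List.all_eq_true.mp hall rule hmem
        rw [Bool.and_eq_true] at h3
        obtain ⟨hA, hB⟩ := h3
        have hpre' := List.isPrefixOf_iff_prefix.mp hpre
        rcases pvPrefix_of_append hpre' with hC | hD
        · rw [List.isPrefixOf_iff_prefix.mpr hC] at hA; simp at hA
        · rw [List.isPrefixOf_iff_prefix.mpr hD] at hB; simp at hB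
    | none =>
      rw [hf] at hpre
      cases q with
      | nil => exact absurd rfl hq0
      | cons a q'' =>
        rw [List.isPrefixOf, Bool.and_eq_true] at hpre
        obtain ⟨hac, hpre2⟩ := hpre
        have haceq : a = c := by simpa using hac
        subst haceq
        by_cases hq''nil : q'' = []
        · subst hq''nil
          simp [List.isPrefixOf]
        · have hq''s : q'' <:+ P := List.IsSuffix.trans ⟨[a], rfl⟩ hqs
          have hlenle : (a :: q'').length ≤ P.length := hqs.length_le
          have hq''P : q'' ≠ P := by
            intro hc
            rw [hc] at hlenle
            simp at hlenle
          have hrec := IH t'.length (by simp) t' rfl q'' hq''nil hq''s hq''P hpre2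
          rw [List.isPrefixOf, Bool.and_eq_true]
          exact ⟨by simp, hrec⟩

def pvGood (tbl : List (List Char × List Char)) (newr : List Char × List Char) : Bool :=
  tbl.all (fun rule => pvFree newr.1 rule.2) &&
  tbl.all (fun rule => pvFree rule.1 newr.1) &&
  pvSuffOK tbl newr.1

theorem pvAbsorb (tbl : List (List Char × List Char)) (old rep : List Char)
    (hold : old ≠ []) (hg : pvGood tbl (old, rep) = true) :
    ∀ s, pvRep old rep (pvScan tbl s) = pvScan (tbl ++ [(old, rep)]) s := by
  simp only [pvGood, Bool.and_eq_true] at hg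
  obtain ⟨⟨hg1, hg2⟩, hg3⟩ := hg
  intro s
  generalize hlen : s.length = n
  induction n using Nat.strong_induction_on generalizing s with
  | _ n IH => ?_
  subst hlen
  cases s with
  | nil => rw [pvScan, pvScan, pvRep]
  | cons c t =>
    rw [pvScan, pvScan, List.find?_append]
    cases hf : tbl.find? (fun rule => rule.1.isPrefixOf (c :: t)) with
    | some rule =>
      have hmem := List.mem_of_find?_eq_some hf
      have hfree : pvFree old rule.2 = true := by
        have := List.all_eq_true.mp hg1 rule hmem; simpa using this
      show pvRep old rep (rule.2 ++ pvScan tbl (List.drop (rule.1.length - 1) t))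
          = rule.2 ++ pvScan (tbl ++ [(old, rep)]) (List.drop (rule.1.length - 1) t)
      rw [pvRep_append old rep rule.2 hfree]
      rw [IH (List.drop (rule.1.length - 1) t).length
        (by simp only [List.length_drop, List.length_cons]; omega) _ rfl]
    | none =>
      obtain ⟨o, p, rfl⟩ : ∃ o p, old = o :: p := by
        cases old with
        | nil => exact absurd rfl hold
        | cons o p => exact ⟨o, p, rfl⟩
      by_cases hp : (o :: p).isPrefixOf (c :: t) = true
      · have hp' := hp
        rw [List.isPrefixOf, Bool.and_eq_true] at hp'
        obtain ⟨hoc, hpt⟩ := hp'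
        have hoceq : o = c := by simpa using hoc
        subst hoceq
        obtain ⟨t₃, ht₃⟩ := List.isPrefixOf_iff_prefix.mp hpt
        have htEq : t = p ++ t₃ := ht₃.symm
        have hfind1 : List.find? (fun rule => rule.1.isPrefixOf (o :: t)) [(o :: p, rep)] = some (o :: p, rep) := by
          simp [List.find?, hp]
        have hall' : tbl.all (fun rule => pvFree rule.1 p) = true := by
          apply List.all_eq_true.mpr
          intro rule hr
          exact (pvFree_cons (by simpa using List.all_eq_true.mp hg2 rule hr)).2.2
        have hscant : pvScan tbl t = p ++ pvScan tbl t₃ := by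
          rw [htEq, pvScan_append tbl p hall']
        show pvRep (o :: p) rep (o :: pvScan tbl t)
            = match (Option.none.or (List.find? (fun rule => rule.1.isPrefixOf (o :: t)) [(o :: p, rep)])) with
              | some rule => rule.2 ++ pvScan (tbl ++ [(o :: p, rep)]) (List.drop (rule.1.length - 1) t)
              | none => o :: pvScan (tbl ++ [(o :: p, rep)]) t
        rw [Option.none_or, hfind1]
        show pvRep (o :: p) rep (o :: pvScan tbl t)
            = rep ++ pvScan (tbl ++ [(o :: p, rep)]) (List.drop ((o :: p).length - 1) t)
        rw [hscant, pvRep]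
        rw [if_pos (by
          apply List.isPrefixOf_iff_prefix.mpr
          exact ⟨pvScan tbl t₃, by simp⟩)]
        have hdrop2 : List.drop ((o :: p).length - 1) (p ++ pvScan tbl t₃) = pvScan tbl t₃ := by simp
        have hdropt : List.drop ((o :: p).length - 1) t = t₃ := by rw [htEq]; simp
        rw [hdrop2, hdropt]
        rw [IH t₃.length (by rw [htEq]; simp only [List.length_append, List.length_cons]; omega) t₃ rfl]
      · have hfind1 : List.find? (fun rule => rule.1.isPrefixOf (c :: t)) [(o :: p, rep)] = none := by
          simp only [List.find?]
          rw [Bool.not_eq_true _ |>.mp hp]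
        show pvRep (o :: p) rep (c :: pvScan tbl t)
            = match (Option.none.or (List.find? (fun rule => rule.1.isPrefixOf (c :: t)) [(o :: p, rep)])) with
              | some rule => rule.2 ++ pvScan (tbl ++ [(o :: p, rep)]) (List.drop (rule.1.length - 1) t)
              | none => c :: pvScan (tbl ++ [(o :: p, rep)]) t
        rw [Option.none_or, hfind1]
        show pvRep (o :: p) rep (c :: pvScan tbl t) = c :: pvScan (tbl ++ [(o :: p, rep)]) t
        have hnp : (o :: p).isPrefixOf (c :: pvScan tbl t) = false := by
          cases hb : (o :: p).isPrefixOf (c :: pvScan tbl t) with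
          | false => rfl
          | true =>
            exfalso
            rw [List.isPrefixOf, Bool.and_eq_true] at hb
            obtain ⟨hoc, hppre⟩ := hb
            have hoceq : o = c := by simpa using hoc
            subst hoceq
            cases hpcase : p with
            | nil =>
              rw [hpcase] at hp
              simp [List.isPrefixOf] at hp
            | cons b p' =>
              rw [hpcase] at hppre
              have hsub := pvScan_no_new tbl (o :: p) hg3 t (b :: p')
                (by simp) (by rw [← hpcase]; exact ⟨[o], rfl⟩)
                (by intro hc; have := congrArg List.length hc; rw [← hpcase] at this; simp at this)
                hppre
              have : (o :: p).isPrefixOf (o :: t) = true := by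
                rw [List.isPrefixOf, Bool.and_eq_true, hpcase]
                exact ⟨by simp, hsub⟩
              exact hp this
        rw [pvRep, if_neg (by simp [hnp])]
        rw [IH t.length (by simp only [List.length_cons]; omega) t rfl]

def pvChainOK : List (List Char × List Char) → List (List Char × List Char) → Bool
  | _, [] => true
  | done, r :: rest => !r.1.isEmpty && pvGood done r && pvChainOK (done ++ [r]) rest

theorem pvChain (rest done : List (List Char × List Char))
    (h : pvChainOK done rest = true) :
    ∀ s, rest.foldl (fun u r => pvRep r.1 r.2 u) (pvScan done s)
      = pvScan (done ++ rest) s := by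
  induction rest generalizing done with
  | nil => intro s; simp
  | cons r rest' ih =>
    intro s
    rw [pvChainOK] at h
    simp only [Bool.and_eq_true] at h
    obtain ⟨⟨hne, hg⟩, hrest⟩ := h
    rw [List.foldl_cons]
    have habs : pvRep r.1 r.2 (pvScan done s) = pvScan (done ++ [r]) s := by
      have hne' : r.1 ≠ [] := by
        cases hr1 : r.1
        · rw [hr1] at hne; simp at hne
        · simp
      rw [pvAbsorb done r.1 r.2 hne' hg s]
    rw [habs, ih (done ++ [r]) hrest s]
    simp

theorem pvFold_toList (L : List (String × String)) (h : ∀ pr ∈ L, pr.1.toList ≠ []) :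
    ∀ u : String, (L.foldl (fun u pr => PySem.Str.replace u pr.1 pr.2) u).toList
      = (L.map (fun pr => (pr.1.toList, pr.2.toList))).foldl (fun cs r => pvRep r.1 r.2 cs) u.toList := by
  induction L with
  | nil => intro u; simp
  | cons pr L' ih =>
    intro u
    rw [List.foldl_cons, List.map_cons, List.foldl_cons]
    rw [ih (fun q hq => h q (List.mem_cons_of_mem pr hq))]
    have : (PySem.Str.replace u pr.1 pr.2).toList = pvRep pr.1.toList pr.2.toList u.toList := by
      rw [PySem.Str.toList_replace]
      exact pvReplace_eq_pvRep _ _ _ (h pr (List.mem_cons_self))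
    rw [this]

-- A's table, at the char level, is exactly scheme ++ tail for B's tables
theorem pvMap_eq_rules :
    pvPrefixMap.map (fun pr => (pr.1.toList, pr.2.toList)) = pvRules := by decide

-- B's two-level scan equals the one-level scan with the full-prefix table
theorem pvScanB_eq (s : List Char) : pvScanB s = pvScan pvRules s := by
  generalize hlen : s.length = n
  induction n using Nat.strong_induction_on generalizing s with
  | _ n IH => ?_
  subst hlen
  cases s with
  | nil => rw [pvScanB, pvScan]
  | cons c t =>
    rw [pvScanB, pvScan]
    have hmap : pvRules.find? (fun rule => rule.1.isPrefixOf (c :: t))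
        = Option.map (fun r => (pvScheme ++ r.1, r.2))
            (pvTails.find? (fun r => (pvScheme ++ r.1).isPrefixOf (c :: t))) := by
      unfold pvRules
      rw [List.find?_map]
      rfl
    by_cases hs : pvScheme.isPrefixOf (c :: t) = true
    · obtain ⟨s', hs'⟩ := List.isPrefixOf_iff_prefix.mp hs
      have hs'' : t.drop 6 = s' := by
        have : (c :: t).drop 7 = (pvScheme ++ s').drop 7 := by rw [hs']
        simpa [pvScheme] using this
      have hpred : (fun r : List Char × List Char => (pvScheme ++ r.1).isPrefixOf (c :: t))
          = (fun r : List Char × List Char => r.1.isPrefixOf (t.drop 6)) := by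
        funext r
        rw [← hs', hs'']
        by_cases h1 : r.1 <+: s'
        · rw [List.isPrefixOf_iff_prefix.mpr h1,
            List.isPrefixOf_iff_prefix.mpr ((List.prefix_append_right_inj pvScheme).mpr h1)]
        · have h2 : ¬ (pvScheme ++ r.1 <+: pvScheme ++ s') := by
            intro hc; exact h1 ((List.prefix_append_right_inj pvScheme).mp hc)
          rw [Bool.eq_iff_iff]
          simp only [List.isPrefixOf_iff_prefix]
          exact ⟨fun hc => absurd hc h2, fun hc => absurd hc h1⟩
      rw [hmap, hpred, if_pos hs]
      cases hf : pvTails.find? (fun r => r.1.isPrefixOf (t.drop 6)) with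
      | none => rw [Option.map_none]
                rw [IH t.length (by simp) t rfl]
      | some r =>
        rw [Option.map_some]
        have hlen7 : (pvScheme ++ r.1).length - 1 = 6 + r.1.length := by
          simp [pvScheme]; omega
        show r.2 ++ pvScanB (t.drop (6 + r.1.length))
            = r.2 ++ pvScan pvRules (t.drop ((pvScheme ++ r.1).length - 1))
        rw [hlen7]
        rw [IH (t.drop (6 + r.1.length)).length (by simp) _ rfl]
    · have hnone : pvRules.find? (fun rule => rule.1.isPrefixOf (c :: t)) = none := by
        rw [hmap]
        rw [List.find?_eq_none.mpr ?_]
        · rfl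
        · intro r _
          intro hc
          have := List.isPrefixOf_iff_prefix.mp hc
          have hpp : pvScheme <+: (c :: t) := List.IsPrefix.trans (List.prefix_append _ _) this
          exact hs (List.isPrefixOf_iff_prefix.mpr hpp)
      rw [hnone, if_neg hs]
      rw [IH t.length (by simp) t rfl]

-- ===== VERDICT (by name: the statement is the Claim_ definition above) =====
theorem shorten_uris_spec : Claim_equal_shorten_uris := by
  intro uri _
  unfold Spec_shorten_uris shorten_uris shorten_uris_alt
  apply String.toList_inj.mp
  rw [String.toList_ofList]
  rw [pvFold_toList pvPrefixMap (by decide) uri]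
  rw [pvMap_eq_rules]
  rw [← pvScan_nil uri.toList]
  rw [pvChain pvRules [] (by decide) uri.toList]
  rw [pvScan_nil uri.toList, List.nil_append]
  rw [pvScanB_eq]
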